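-- pv_equiv track=rewrite | github.com/kunalnarangtheone/coding_problems | divide_and_conquer/num_ways_cost.py | num_ways_cost
-- ===== SOURCE A (Python) =====
-- def num_ways_cost(matrix, i, j, cost):
--
--     if i > len(matrix[0]) - 1 or j > len(matrix) - 1 or cost < 0:
--         return 0
--
--     elif i == len(matrix[0]) -1 and j == len(matrix) - 1 and matrix[i][j] == cost:
--         return 1
--
--     else:
--         op1 = num_ways_cost(matrix, i + 1, j, cost - matrix[i][j])
--         op2 = num_ways_cost(matrix, i, j + 1, cost - matrix[i][j])
--
--         return op1 + op2
-- ===== SOURCE B (Python) =====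
-- def num_ways_cost(matrix, i, j, cost):
--     W = len(matrix[0])
--     H = len(matrix)
--     memo = {}
--
--     def go(i, j, cost):
--         if i > W - 1 or j > H - 1 or cost < 0:
--             return 0
--         key = (i, j, cost)
--         if key in memo:
--             return memo[key]
--         v = matrix[i][j]
--         if i == W - 1 and j == H - 1 and v == cost:
--             res = 1
--         else:
--             res = go(i + 1, j, cost - v) + go(i, j + 1, cost - v)
--         memo[key] = res
--         return res
--
--     return go(i, j, cost)
-- ===== Notes on version B (the rewrite author's own statement) =====
-- stated objective: alternative
-- what changed: Replaced the plain exponential recursion with the same recurrence memoized on (i, j, remaining cost) via a dict, so each state is computed once.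
-- outside the precondition, e.g. on num_ways_cost([[1], [2]], 0, 0, 0): A returns 0, B returns 0
import Mathlib
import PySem

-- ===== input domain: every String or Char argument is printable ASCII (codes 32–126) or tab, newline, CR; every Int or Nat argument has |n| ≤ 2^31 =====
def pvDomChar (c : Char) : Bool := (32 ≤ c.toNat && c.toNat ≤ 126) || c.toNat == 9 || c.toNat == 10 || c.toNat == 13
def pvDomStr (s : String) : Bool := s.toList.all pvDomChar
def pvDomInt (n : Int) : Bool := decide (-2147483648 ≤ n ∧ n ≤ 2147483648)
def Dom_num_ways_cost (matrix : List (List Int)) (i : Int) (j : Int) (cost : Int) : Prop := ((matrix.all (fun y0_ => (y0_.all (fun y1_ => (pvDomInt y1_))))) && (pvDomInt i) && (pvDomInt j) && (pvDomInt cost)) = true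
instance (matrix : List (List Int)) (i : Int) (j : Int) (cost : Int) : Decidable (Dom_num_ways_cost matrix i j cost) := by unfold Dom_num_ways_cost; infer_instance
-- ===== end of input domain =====

-- B memoizes A's recursion on (i, j, remaining cost) with a dict, computing each state once; return values agree on all of Pre_.


-- ===== PORT A =====
-- literal transliteration of A: plain recursion; matrix[i][j] ported with pyGet? (getD junk only outside Pre_)
def num_ways_cost (matrix : List (List Int)) (i : Int) (j : Int) (cost : Int) : Int :=
  if i > (((PySem.List.pyGet? matrix 0).getD []).length : Int) - 1 ∨ j > (matrix.length : Int) - 1 ∨ cost < 0 then 0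
  else
    if i = (((PySem.List.pyGet? matrix 0).getD []).length : Int) - 1 ∧ j = (matrix.length : Int) - 1 ∧
        (PySem.List.pyGet? ((PySem.List.pyGet? matrix i).getD []) j).getD 0 = cost then 1
    else
      num_ways_cost matrix (i+1) j (cost - (PySem.List.pyGet? ((PySem.List.pyGet? matrix i).getD []) j).getD 0) +
      num_ways_cost matrix i (j+1) (cost - (PySem.List.pyGet? ((PySem.List.pyGet? matrix i).getD []) j).getD 0)
termination_by (((((PySem.List.pyGet? matrix 0).getD []).length : Int) - i) + ((matrix.length : Int) - j)).toNat
decreasing_by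
  · rename_i h _; push_neg at h; omega
  · rename_i h _; push_neg at h; omega

-- ===== PORT B =====
-- B's inner `go`: same recurrence threaded through a memo dict keyed by (i, j, cost)
def pvGoB (matrix : List (List Int)) (W : Int) (H : Int) (i : Int) (j : Int) (cost : Int)
    (memo : PySem.Dict (Int × Int × Int) Int) : Int × PySem.Dict (Int × Int × Int) Int :=
  if i > W - 1 ∨ j > H - 1 ∨ cost < 0 then (0, memo)
  else
    match memo.get? (i, j, cost) with
    | some r => (r, memo)
    | none =>
      let v : Int := (PySem.List.pyGet? ((PySem.List.pyGet? matrix i).getD []) j).getD 0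
      if i = W - 1 ∧ j = H - 1 ∧ v = cost then
        (1, memo.insert (i, j, cost) 1)
      else
        let p1 := pvGoB matrix W H (i+1) j (cost - v) memo
        let p2 := pvGoB matrix W H i (j+1) (cost - v) p1.2
        (p1.1 + p2.1, p2.2.insert (i, j, cost) (p1.1 + p2.1))
termination_by ((W - i) + (H - j)).toNat
decreasing_by
  · rename_i h _; push_neg at h; omega
  · rename_i h _; push_neg at h; omega

def num_ways_cost_alt (matrix : List (List Int)) (i : Int) (j : Int) (cost : Int) : Int :=
  (pvGoB matrix (((PySem.List.pyGet? matrix 0).getD []).length : Int) (matrix.length : Int)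
    i j cost PySem.Dict.empty).1

-- ===== PRECONDITION & SPEC =====
-- Pre_ admits every input that returns at the first guard (i/j out of range or cost < 0, matrix nonempty)
-- and every input whose whole reachable rectangle is indexable (len(matrix[0]) <= len(matrix), all rows at
-- least len(matrix) long, i and j at least -len(matrix)). It excludes matrix = [] (A raises at matrix[0]) and
-- the ragged/short-row inputs where A's mixed-axis indexing (bounds from len(matrix[0]) vs len(matrix), access
-- matrix[i][j]) raises IndexError unless cost-pruning happens to stop it first; on those few pruned inputs A
-- returns 0 and B returns the same 0, but no closed-form condition on the input separates them.
def Pre_num_ways_cost (matrix : List (List Int)) (i : Int) (j : Int) (cost : Int) : Prop :=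
  matrix ≠ [] ∧
  ((i > ((matrix.headD []).length : Int) - 1 ∨ j > (matrix.length : Int) - 1 ∨ cost < 0) ∨
   (((matrix.headD []).length : Int) ≤ (matrix.length : Int) ∧
    (∀ r ∈ matrix, matrix.length ≤ r.length) ∧
    -(matrix.length : Int) ≤ i ∧ -(matrix.length : Int) ≤ j))
instance (matrix : List (List Int)) (i : Int) (j : Int) (cost : Int) : Decidable (Pre_num_ways_cost matrix i j cost) := by unfold Pre_num_ways_cost; infer_instance

def pvWitness_num_ways_cost : List (List Int) × Int × Int × Int := ([[1, 2], [3, 4]], 0, 0, 8)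

def Spec_num_ways_cost (matrix : List (List Int)) (i : Int) (j : Int) (cost : Int) (out : Int) : Prop := out = num_ways_cost_alt matrix i j cost
instance (matrix : List (List Int)) (i : Int) (j : Int) (cost : Int) (out : Int) : Decidable (Spec_num_ways_cost matrix i j cost out) := by unfold Spec_num_ways_cost; infer_instance

-- ===== CLAIM (what is proved, stated in full; the proofs are below) =====
def Claim_equal_num_ways_cost : Prop := ∀ (matrix : List (List Int)) (i : Int) (j : Int) (cost : Int), Dom_num_ways_cost matrix i j cost → Pre_num_ways_cost matrix i j cost → Spec_num_ways_cost matrix i j cost (num_ways_cost matrix i j cost)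

-- ===== LEMMAS AND PROOFS =====

-- memo invariant: every cached value is the plain recursion's value at its key
def pvGood (matrix : List (List Int)) (memo : PySem.Dict (Int × Int × Int) Int) : Prop :=
  ∀ p r, memo.get? p = some r → r = num_ways_cost matrix p.1 p.2.1 p.2.2

lemma pvGoB_correct (matrix : List (List Int)) :
    ∀ (n : Nat) (i j cost : Int) (memo : PySem.Dict (Int × Int × Int) Int),
      (((((PySem.List.pyGet? matrix 0).getD []).length : Int) - i) + ((matrix.length : Int) - j)).toNat < n →
      pvGood matrix memo →
      (pvGoB matrix (((PySem.List.pyGet? matrix 0).getD []).length : Int) (matrix.length : Int) i j cost memo).1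
        = num_ways_cost matrix i j cost ∧
      pvGood matrix (pvGoB matrix (((PySem.List.pyGet? matrix 0).getD []).length : Int) (matrix.length : Int) i j cost memo).2 := by
  intro n
  induction n with
  | zero => intro i j cost memo hm; omega
  | succ n ih =>
    intro i j cost memo hm hgood
    rw [pvGoB]
    by_cases hguard : i > (((PySem.List.pyGet? matrix 0).getD []).length : Int) - 1 ∨ j > (matrix.length : Int) - 1 ∨ cost < 0
    · simp only [if_pos hguard]
      refine ⟨?_, hgood⟩
      rw [num_ways_cost, if_pos hguard]
    · simp only [if_neg hguard]
      cases hmem : memo.get? (i, j, cost) with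
      | some r => exact ⟨hgood (i, j, cost) r hmem, hgood⟩
      | none =>
        by_cases hterm : i = (((PySem.List.pyGet? matrix 0).getD []).length : Int) - 1 ∧ j = (matrix.length : Int) - 1 ∧
            (PySem.List.pyGet? ((PySem.List.pyGet? matrix i).getD []) j).getD 0 = cost
        · simp only [if_pos hterm]
          have hf : num_ways_cost matrix i j cost = 1 := by
            rw [num_ways_cost, if_neg hguard, if_pos hterm]
          refine ⟨hf.symm, ?_⟩
          intro p r hp
          rw [PySem.Dict.get?_insert] at hp
          by_cases hpk : p = (i, j, cost)
          · rw [if_pos hpk] at hp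
            injection hp with h
            subst h; subst hpk
            exact hf.symm
          · rw [if_neg hpk] at hp
            exact hgood p r hp
        · simp only [if_neg hterm]
          have hng := hguard
          push_neg at hng
          obtain ⟨hi, hj, hc⟩ := hng
          have hf : num_ways_cost matrix i j cost =
              num_ways_cost matrix (i+1) j (cost - (PySem.List.pyGet? ((PySem.List.pyGet? matrix i).getD []) j).getD 0) +
              num_ways_cost matrix i (j+1) (cost - (PySem.List.pyGet? ((PySem.List.pyGet? matrix i).getD []) j).getD 0) := by
            rw [num_ways_cost, if_neg hguard, if_neg hterm]
          have h1 := ih (i+1) j (cost - (PySem.List.pyGet? ((PySem.List.pyGet? matrix i).getD []) j).getD 0) memo (by omega) hgood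
          have h2 := ih i (j+1) (cost - (PySem.List.pyGet? ((PySem.List.pyGet? matrix i).getD []) j).getD 0) _ (by omega) h1.2
          have hval : num_ways_cost matrix i j cost =
              (pvGoB matrix (((PySem.List.pyGet? matrix 0).getD []).length : Int) (matrix.length : Int) (i+1) j
                (cost - (PySem.List.pyGet? ((PySem.List.pyGet? matrix i).getD []) j).getD 0) memo).1 +
              (pvGoB matrix (((PySem.List.pyGet? matrix 0).getD []).length : Int) (matrix.length : Int) i (j+1)
                (cost - (PySem.List.pyGet? ((PySem.List.pyGet? matrix i).getD []) j).getD 0)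
                (pvGoB matrix (((PySem.List.pyGet? matrix 0).getD []).length : Int) (matrix.length : Int) (i+1) j
                  (cost - (PySem.List.pyGet? ((PySem.List.pyGet? matrix i).getD []) j).getD 0) memo).2).1 := by
            rw [hf, h1.1, h2.1]
          refine ⟨hval.symm, ?_⟩
          intro p r hp
          rw [PySem.Dict.get?_insert] at hp
          by_cases hpk : p = (i, j, cost)
          · rw [if_pos hpk] at hp
            injection hp with h
            subst h; subst hpk
            exact hval.symm
          · rw [if_neg hpk] at hp
            exact h2.2 p r hp

-- ===== VERDICT (by name: the statement is the Claim_ definition above) =====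
theorem num_ways_cost_spec : Claim_equal_num_ways_cost := by
  intro matrix i j cost _ _
  unfold Spec_num_ways_cost num_ways_cost_alt
  have h := pvGoB_correct matrix
    ((((((PySem.List.pyGet? matrix 0).getD []).length : Int) - i) + ((matrix.length : Int) - j)).toNat + 1)
    i j cost PySem.Dict.empty (by omega)
    (by intro p r hp; simp [PySem.Dict.get?_empty] at hp)
  exact h.1.symm
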